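-- pv_equiv track=rewrite | github.com/aprotyas/advent-of-code-2022 | 6/solution.py | detect_marker
-- ===== SOURCE A (Python) =====
-- from typing import Final, Optional
--
-- def detect_marker(datastream: str, unique_len: int) -> int:
--   entry_sequence = [None] * unique_len
--   entry_map = {}
--   for idx, data in enumerate(datastream):
--     to_remove: Optional[int] = None
--     if idx >= unique_len:
--       to_remove = entry_sequence[idx % unique_len]
--
--     entry_sequence[idx % unique_len] = data
--     if data not in entry_map:
--       entry_map[data] = 1
--     else:
--       entry_map[data] += 1
--
--     if to_remove is not None:
--       entry_map[to_remove] -= 1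
--       if entry_map[to_remove] == 0:
--         entry_map.pop(to_remove)
--
--     if len(entry_map) == unique_len:
--       return idx + 1
--   return 0
-- ===== SOURCE B (Python) =====
-- def detect_marker(datastream: str, unique_len: int) -> int:
--   for i in range(len(datastream)):
--     if i + 1 >= unique_len and len(set(datastream[i + 1 - unique_len : i + 1])) == unique_len:
--       return i + 1
--   return 0
-- ===== Notes on version B (the rewrite author's own statement) =====
-- stated objective: simpler
-- what changed: Replaces the incremental sliding-window machinery (ring buffer of the last unique_len characters plus a running count map with decrement-and-pop) by a direct per-position rescan: at each index check whether the window of the last unique_len characters has all-distinct characters via len(set(slice)).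
import Mathlib
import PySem

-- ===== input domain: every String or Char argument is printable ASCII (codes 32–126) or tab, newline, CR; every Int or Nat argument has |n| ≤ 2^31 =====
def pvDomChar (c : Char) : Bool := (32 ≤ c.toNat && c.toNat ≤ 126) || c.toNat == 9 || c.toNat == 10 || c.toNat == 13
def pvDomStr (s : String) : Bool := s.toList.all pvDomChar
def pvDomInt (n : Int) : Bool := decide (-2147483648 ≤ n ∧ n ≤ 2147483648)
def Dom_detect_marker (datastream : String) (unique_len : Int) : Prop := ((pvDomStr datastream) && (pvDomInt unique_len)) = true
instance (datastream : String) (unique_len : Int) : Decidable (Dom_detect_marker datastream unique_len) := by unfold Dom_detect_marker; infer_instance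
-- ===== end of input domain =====

-- B replaces A's incremental ring-buffer + count-map sliding window by a per-position
-- rescan (len(set(window)) on a fresh slice at each index): simpler, not faster.

-- ===== PORT A =====
-- entry_sequence is the ring buffer (None-initialised), emap the running count dict;
-- the loop over enumerate(datastream) becomes structural recursion with idx carried along.
def pvALoop (ul : Int) (seq : List (Option Char)) (emap : PySem.Dict Char Int) (idx : Nat) : List Char → Int
  | [] => 0
  | data :: rest =>
    let to_remove : Option Char :=
      if (idx : Int) ≥ ul then
        (PySem.List.pyGet? seq (PySem.Int.mod (idx : Int) ul)).getD none
      else none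
    let seq' := PySem.List.pySetD seq (PySem.Int.mod (idx : Int) ul) (some data)
    let emap1 := if emap.contains data then emap.insert data (emap.getD data 0 + 1)
                 else emap.insert data 1
    let emap2 :=
      match to_remove with
      | none => emap1
      | some c =>
        let m := emap1.insert c (emap1.getD c 0 - 1)
        if m.getD c 0 == 0 then m.erase c else m
    if (emap2.size : Int) = ul then (idx : Int) + 1
    else pvALoop ul seq' emap2 (idx + 1) rest

def detect_marker (datastream : String) (unique_len : Int) : Int :=
  pvALoop unique_len (List.replicate unique_len.toNat none) PySem.Dict.empty 0 datastream.toList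

-- ===== PORT B =====
-- for i in range(len(datastream)): if i+1 >= unique_len and
--   len(set(datastream[i+1-unique_len:i+1])) == unique_len: return i+1; else 0
def pvBLoop (cs : List Char) (ul : Int) : List Int → Int
  | [] => 0
  | i :: rest =>
    if i + 1 ≥ ul ∧
       PySem.Set.len (PySem.Set.ofList (PySem.List.slice cs (some (i + 1 - ul)) (some (i + 1)))) = ul
    then i + 1
    else pvBLoop cs ul rest

def detect_marker_alt (datastream : String) (unique_len : Int) : Int :=
  pvBLoop datastream.toList unique_len (PySem.List.pyRange 0 (PySem.Str.len datastream) 1)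

-- ===== PRECONDITION & SPEC =====
-- A raises on non-positive unique_len with a non-empty datastream (ZeroDivisionError from
-- idx % 0, IndexError on the empty ring buffer for negative unique_len); those inputs are excluded.
def Pre_detect_marker (datastream : String) (unique_len : Int) : Prop :=
  1 ≤ unique_len ∨ datastream = ""
instance (datastream : String) (unique_len : Int) : Decidable (Pre_detect_marker datastream unique_len) := by
  unfold Pre_detect_marker; infer_instance

def pvWitness_detect_marker : String × Int := ("mjqjpqmgbljsphdztnvjfqwrcgsmlb", 4)

def Spec_detect_marker (datastream : String) (unique_len : Int) (out : Int) : Prop := out = detect_marker_alt datastream unique_len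
instance (datastream : String) (unique_len : Int) (out : Int) : Decidable (Spec_detect_marker datastream unique_len out) := by unfold Spec_detect_marker; infer_instance

-- ===== CLAIM (what is proved, stated in full; the proofs are below) =====
def Claim_equal_detect_marker : Prop := ∀ (datastream : String) (unique_len : Int), Dom_detect_marker datastream unique_len → Pre_detect_marker datastream unique_len → Spec_detect_marker datastream unique_len (detect_marker datastream unique_len)

-- ===== LEMMAS AND PROOFS =====

theorem pv_get?_erase {κ ν : Type} [DecidableEq κ] [BEq κ] [LawfulBEq κ] (d : PySem.Dict κ ν) (k k' : κ) :
    (d.erase k).get? k' = if k' = k then none else d.get? k' := by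
  obtain ⟨items⟩ := d
  induction items with
  | nil => simp [PySem.Dict.erase, PySem.Dict.get?]
  | cons p rest ih =>
    simp only [PySem.Dict.erase, PySem.Dict.get?] at ih ⊢
    rw [List.filter_cons]
    by_cases h1 : p.1 = k
    · have : (!p.1 == k) = false := by simp [h1]
      rw [this, if_neg (by simp), ih]
      by_cases h2 : k' = k
      · simp [h2]
      · have : (p.1 == k') = false := by simp [h1, Ne.symm h2]
        simp [this]
    · have hb : (!p.1 == k) = true := by simp [h1]
      rw [if_pos hb]
      by_cases h2 : p.1 = k'
      · have hne : ¬ k' = k := by rw [← h2]; exact fun hh => h1 (hh ▸ rfl)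
        simp [h2, hne]
      · have : (p.1 == k') = false := by simp [h2]
        simp only [List.find?_cons, this]
        exact ih

theorem pv_nodup_keys_erase {κ ν : Type} [BEq κ] (d : PySem.Dict κ ν) (k : κ)
    (h : d.keys.Nodup) : (d.erase k).keys.Nodup := by
  have hsub : (d.erase k).items.Sublist d.items := List.filter_sublist
  exact (hsub.map Prod.fst).nodup h

def pvIsCnt (emap : PySem.Dict Char Int) (w : List Char) : Prop :=
  ∀ c : Char, emap.get? c = if w.count c = 0 then none else some ((w.count c : Nat) : Int)

theorem pv_cnt_incr (emap : PySem.Dict Char Int) (w : List Char) (data : Char)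
    (h : pvIsCnt emap w) :
    pvIsCnt (if emap.contains data then emap.insert data (emap.getD data 0 + 1)
             else emap.insert data 1) (w ++ [data]) := by
  intro c
  have hc := h c
  have hd := h data
  have hcnt : (w ++ [data]).count c = w.count c + (if c = data then 1 else 0) := by
    by_cases hcd : c = data
    · simp [List.count_append, hcd]
    · have : data ≠ c := fun hh => hcd hh.symm
      simp [List.count_append, hcd, this]
  by_cases hmem : emap.contains data
  · have hpos : w.count data ≠ 0 := by
      intro h0
      rw [PySem.Dict.contains_eq_isSome_get?, hd, if_pos h0] at hmem
      simp at hmem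
    rw [if_pos hmem, PySem.Dict.get?_insert]
    have hgd : emap.getD data 0 = ((w.count data : Nat) : Int) := by
      rw [PySem.Dict.getD_eq_get?_getD, hd, if_neg hpos]; rfl
    by_cases hcd : c = data
    · subst hcd
      rw [if_pos rfl, hgd, hcnt, if_pos rfl, if_neg (by omega)]
      push_cast; ring_nf
    · rw [if_neg hcd, hc, hcnt, if_neg hcd]; simp
  · have hz : w.count data = 0 := by
      by_contra h0
      rw [PySem.Dict.contains_eq_isSome_get?, hd, if_neg h0] at hmem
      simp at hmem
    rw [if_neg hmem, PySem.Dict.get?_insert]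
    by_cases hcd : c = data
    · subst hcd
      rw [if_pos rfl, hcnt, hz, if_pos rfl, if_neg (by omega)]
      simp
    · rw [if_neg hcd, hc, hcnt, if_neg hcd]; simp

theorem pv_cnt_decr (emap1 : PySem.Dict Char Int) (c0 : Char) (w' : List Char)
    (h : pvIsCnt emap1 (c0 :: w')) :
    pvIsCnt (if ((emap1.insert c0 (emap1.getD c0 0 - 1)).getD c0 0 == 0) = true
             then (emap1.insert c0 (emap1.getD c0 0 - 1)).erase c0
             else emap1.insert c0 (emap1.getD c0 0 - 1)) w' := by
  intro c
  have hc0 := h c0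
  have hcnt0 : (c0 :: w').count c0 = w'.count c0 + 1 := by simp
  have hgd : emap1.getD c0 0 = ((w'.count c0 + 1 : Nat) : Int) := by
    rw [PySem.Dict.getD_eq_get?_getD, hc0, hcnt0, if_neg (by omega)]; rfl
  have hval : emap1.getD c0 0 - 1 = ((w'.count c0 : Nat) : Int) := by rw [hgd]; push_cast; ring
  have hgd2 : (emap1.insert c0 (emap1.getD c0 0 - 1)).getD c0 0 = ((w'.count c0 : Nat) : Int) := by
    rw [PySem.Dict.getD_insert_self, hval]
  by_cases hz : w'.count c0 = 0
  · rw [if_pos (by rw [hgd2, hz]; simp), pv_get?_erase]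
    by_cases hcc : c = c0
    · rw [if_pos hcc, hcc, if_pos hz]
    · have hne : c0 ≠ c := fun hh => hcc hh.symm
      rw [if_neg hcc, PySem.Dict.get?_insert, if_neg hcc, h c]
      simp [hne]
  · rw [if_neg (by rw [hgd2]; simp; omega), PySem.Dict.get?_insert]
    by_cases hcc : c = c0
    · rw [if_pos hcc, hcc, hval, if_neg hz]
    · have hne : c0 ≠ c := fun hh => hcc hh.symm
      rw [if_neg hcc, h c]
      simp [hne]

theorem pv_nodup_incr (emap : PySem.Dict Char Int) (data : Char)
    (h : emap.keys.Nodup) :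
    (if emap.contains data then emap.insert data (emap.getD data 0 + 1)
     else emap.insert data 1).keys.Nodup := by
  split <;> exact PySem.Dict.nodup_keys_insert _ _ _ h

theorem pv_nodup_decr (emap1 : PySem.Dict Char Int) (c0 : Char)
    (h : emap1.keys.Nodup) :
    (if ((emap1.insert c0 (emap1.getD c0 0 - 1)).getD c0 0 == 0) = true
     then (emap1.insert c0 (emap1.getD c0 0 - 1)).erase c0
     else emap1.insert c0 (emap1.getD c0 0 - 1)).keys.Nodup := by
  split
  · exact pv_nodup_keys_erase _ _ (PySem.Dict.nodup_keys_insert _ _ _ h)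
  · exact PySem.Dict.nodup_keys_insert _ _ _ h

theorem pv_size_eq (emap : PySem.Dict Char Int) (w : List Char)
    (h : pvIsCnt emap w) (hnd : emap.keys.Nodup) :
    emap.size = (PySem.Set.ofList w).length := by
  have hmem : ∀ c, c ∈ emap.keys ↔ c ∈ PySem.Set.ofList w := by
    intro c
    rw [PySem.Set.mem_ofList]
    constructor
    · intro hk
      by_contra hw
      have hz : w.count c = 0 := List.count_eq_zero.mpr hw
      have hn : emap.get? c = none := by rw [h c, if_pos hz]
      exact (PySem.Dict.get?_eq_none_iff_not_mem_keys _ _).mp hn hk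
    · intro hw
      by_contra hk
      have hn := (PySem.Dict.get?_eq_none_iff_not_mem_keys _ _).mpr hk
      rw [h c] at hn
      have : w.count c ≠ 0 := by have := List.count_pos_iff.mpr hw; omega
      simp [this] at hn
  have hperm : emap.keys.Perm (PySem.Set.ofList w) :=
    (List.perm_ext_iff_of_nodup hnd (PySem.Set.nodup_ofList _)).mpr hmem
  have hlen : emap.keys.length = (PySem.Set.ofList w).length := hperm.length_eq
  simpa [PySem.Dict.keys, PySem.Dict.size] using hlen

theorem pv_main (ul : Int) (hul : 1 ≤ ul) (cs : List Char) :
    ∀ (suf pre : List Char), cs = pre ++ suf →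
    ∀ (seq : List (Option Char)) (emap : PySem.Dict Char Int),
      seq.length = ul.toNat →
      (∀ m : Nat, m < pre.length → pre.length ≤ m + ul.toNat →
        seq[m % ul.toNat]? = (cs[m]?).map some) →
      pvIsCnt emap (pre.drop (pre.length - ul.toNat)) →
      emap.keys.Nodup →
      pvALoop ul seq emap pre.length suf
        = pvBLoop cs ul (PySem.List.pyRange (pre.length : Int) (cs.length : Int) 1) := by
  intro suf
  induction suf with
  | nil =>
    intro pre hcs seq emap hlen hseq hmap hnd
    have hlen' : cs.length = pre.length := by simp [hcs]
    rw [hlen', PySem.List.pyRange_one_eq_nil (le_refl _)]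
    simp [pvALoop, pvBLoop]
  | cons data rest ih =>
    intro pre hcs seq emap hlen hseq hmap hnd
    have hu : (ul.toNat : Int) = ul := Int.toNat_of_nonneg (by omega)
    have hulN : 1 ≤ ul.toNat := by omega
    have hidxlt : pre.length < cs.length := by simp [hcs]
    have hmod : PySem.Int.mod (pre.length : Int) ul = ((pre.length % ul.toNat : Nat) : Int) := by
      rw [PySem.Int.mod_eq_emod_of_pos (by omega), ← hu]
      push_cast
      rfl
    -- B side: peel off index pre.length
    rw [show ((cs.length : Int)) = ((cs.length : Int)) from rfl]
    rw [PySem.List.pyRange_one_cons (by exact_mod_cast hidxlt)]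
    -- shared: the updated ring buffer
    have hsetlt : pre.length % ul.toNat < seq.length := by
      rw [hlen]; exact Nat.mod_lt _ (by omega)
    have hseq'def : PySem.List.pySetD seq (PySem.Int.mod ((pre.length : Nat) : Int) ul) (some data)
        = seq.set (pre.length % ul.toNat) (some data) := by
      rw [hmod, PySem.List.pySetD_natCast]
    have hseq' : ∀ m : Nat, m < pre.length + 1 → pre.length + 1 ≤ m + ul.toNat →
        (seq.set (pre.length % ul.toNat) (some data))[m % ul.toNat]? = (cs[m]?).map some := by
      intro m hm1 hm2
      by_cases hmeq : m = pre.length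
      · subst hmeq
        rw [List.getElem?_set_self hsetlt]
        have hgd : cs[pre.length]? = some data := by
          rw [hcs, List.getElem?_append_right (le_refl _)]
          simp
        rw [hgd]; rfl
      · have hmlt2 : m < pre.length := by omega
        have hneq : pre.length % ul.toNat ≠ m % ul.toNat := by
          intro he
          have hmod2 : m ≡ pre.length [MOD ul.toNat] := he.symm
          have hdvd : ul.toNat ∣ pre.length - m := (Nat.modEq_iff_dvd' (le_of_lt hmlt2)).mp hmod2
          have := Nat.le_of_dvd (by omega) hdvd
          omega
        rw [List.getElem?_set_ne hneq]
        exact hseq m hmlt2 (by omega)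
    have hcs2 : cs = (pre ++ [data]) ++ rest := by rw [hcs]; simp
    have hlen2 : (pre ++ [data]).length = pre.length + 1 := by simp
    -- the post-step window
    by_cases hge : ul ≤ ((pre.length : Nat) : Int)
    · -- idx ≥ unique_len : a char drops out of the window
      have hgeN : ul.toNat ≤ pre.length := by omega
      have hmlt : pre.length - ul.toNat < cs.length := by omega
      obtain ⟨c0, hc0get⟩ : ∃ c, cs[pre.length - ul.toNat]? = some c :=
        ⟨_, List.getElem?_eq_getElem hmlt⟩
      have hseqget : seq[pre.length % ul.toNat]? = some (some c0) := by
        rw [Nat.mod_eq_sub_mod hgeN]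
        rw [hseq (pre.length - ul.toNat) (by omega) (by omega), hc0get]
        rfl
      -- decompose the old window as c0 :: t
      have hwlen : (pre.drop (pre.length - ul.toNat)).length = ul.toNat := by
        simp; omega
      have hw0 : (pre.drop (pre.length - ul.toNat))[0]? = some c0 := by
        rw [List.getElem?_drop, Nat.add_zero, ← hc0get, hcs,
          List.getElem?_append_left (by omega)]
      obtain ⟨t, hwt⟩ : ∃ t, pre.drop (pre.length - ul.toNat) = c0 :: t := by
        cases hw : pre.drop (pre.length - ul.toNat) with
        | nil => rw [hw] at hwlen; simp at hwlen; omega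
        | cons a tt =>
          rw [hw] at hw0; simp at hw0
          exact ⟨tt, by rw [hw0]⟩
      have hw' : (pre ++ [data]).drop (pre.length + 1 - ul.toNat) = t ++ [data] := by
        rw [List.drop_append_of_le_length (by omega)]
        rw [show pre.length + 1 - ul.toNat = (pre.length - ul.toNat) + 1 from by omega]
        rw [← List.tail_drop, hwt]
        rfl
      have hlt : (t ++ [data]).length = ul.toNat := by
        have h1 := hwlen
        rw [hwt] at h1
        simp at h1 ⊢
        omega
      -- count-map invariants through the step
      have hmap1 := pv_cnt_incr emap _ data hmap
      rw [hwt] at hmap1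
      have hmap1' : pvIsCnt
          (if emap.contains data then emap.insert data (emap.getD data 0 + 1)
           else emap.insert data 1) (c0 :: (t ++ [data])) := by
        simpa using hmap1
      set emap1 := (if emap.contains data then emap.insert data (emap.getD data 0 + 1)
                    else emap.insert data 1) with hemap1
      have hmap2 := pv_cnt_decr emap1 c0 (t ++ [data]) hmap1'
      have hnd2 := pv_nodup_decr emap1 c0 (pv_nodup_incr emap data hnd)
      set emap2 := (if ((emap1.insert c0 (emap1.getD c0 0 - 1)).getD c0 0 == 0) = true
                    then (emap1.insert c0 (emap1.getD c0 0 - 1)).erase c0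
                    else emap1.insert c0 (emap1.getD c0 0 - 1)) with hemap2
      have hsize := pv_size_eq emap2 (t ++ [data]) hmap2 hnd2
      -- A's step reduces to emap2 and the set ring buffer
      have hA : pvALoop ul seq emap pre.length (data :: rest)
          = (if ((emap2.size : Nat) : Int) = ul then ((pre.length : Nat) : Int) + 1
             else pvALoop ul (seq.set (pre.length % ul.toNat) (some data)) emap2 (pre.length + 1) rest) := by
        rw [pvALoop]
        rw [if_pos (show ((pre.length : Nat) : Int) ≥ ul from hge)]
        rw [hmod, PySem.List.pyGet?_natCast, hseqget]
        simp only [Option.getD_some, PySem.List.pySetD_natCast]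
        rfl
      -- B's slice is exactly the new window
      have hslice : PySem.List.slice cs (some (((pre.length : Nat) : Int) + 1 - ul)) (some (((pre.length : Nat) : Int) + 1))
          = t ++ [data] := by
        rw [show ((pre.length : Nat) : Int) + 1 - ul = ((pre.length + 1 - ul.toNat : Nat) : Int) from by omega]
        rw [show ((pre.length : Nat) : Int) + 1 = ((pre.length + 1 : Nat) : Int) from by push_cast; ring]
        rw [PySem.List.slice_natCast]
        rw [show pre.length + 1 - (pre.length + 1 - ul.toNat) = ul.toNat from by omega]
        rw [hcs2, List.drop_append_of_le_length (by omega), hw']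
        rw [← hlt, List.take_left]
      have hB : pvBLoop cs ul (((pre.length : Nat) : Int) :: PySem.List.pyRange (((pre.length : Nat) : Int) + 1) ((cs.length : Nat) : Int))
          = (if (((PySem.Set.ofList (t ++ [data])).length : Nat) : Int) = ul then ((pre.length : Nat) : Int) + 1
             else pvBLoop cs ul (PySem.List.pyRange (((pre.length : Nat) : Int) + 1) ((cs.length : Nat) : Int))) := by
        rw [pvBLoop, hslice]
        by_cases hcond : (((PySem.Set.ofList (t ++ [data])).length : Nat) : Int) = ul
        · rw [if_pos ⟨by omega, hcond⟩, if_pos hcond]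
        · rw [if_neg (by intro hh; exact hcond hh.2), if_neg hcond]
      rw [hA, hB, hsize]
      by_cases hcond : (((PySem.Set.ofList (t ++ [data])).length : Nat) : Int) = ul
      · rw [if_pos hcond, if_pos hcond]
      · rw [if_neg hcond, if_neg hcond]
        have := ih (pre ++ [data]) (by rw [hcs2]) (seq.set (pre.length % ul.toNat) (some data)) emap2
          (by simp [hlen]) (by rw [hlen2]; exact hseq') (by rw [hlen2, hw']; exact hmap2) hnd2
        rw [hlen2] at this
        rw [this]
        rw [show (((pre.length + 1 : Nat)) : Int) = ((pre.length : Nat) : Int) + 1 from by push_cast; ring]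
    · -- idx < unique_len : nothing drops out of the window
      have hltN : pre.length < ul.toNat := by omega
      have hzero : pre.length + 1 - ul.toNat = 0 := by omega
      rw [show pre.length - ul.toNat = 0 from by omega, List.drop_zero] at hmap
      have hmap1 := pv_cnt_incr emap pre data hmap
      set emap1 := (if emap.contains data then emap.insert data (emap.getD data 0 + 1)
                    else emap.insert data 1) with hemap1
      have hnd1 := pv_nodup_incr emap data hnd
      have hsize := pv_size_eq emap1 (pre ++ [data]) hmap1 hnd1
      have hA : pvALoop ul seq emap pre.length (data :: rest)
          = (if ((emap1.size : Nat) : Int) = ul then ((pre.length : Nat) : Int) + 1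
             else pvALoop ul (seq.set (pre.length % ul.toNat) (some data)) emap1 (pre.length + 1) rest) := by
        rw [pvALoop]
        rw [if_neg (show ¬ (((pre.length : Nat) : Int) ≥ ul) from hge)]
        rw [hmod, PySem.List.pySetD_natCast]
      rw [hA, hsize, pvBLoop]
      have hrec : pvALoop ul (seq.set (pre.length % ul.toNat) (some data)) emap1 (pre.length + 1) rest
          = pvBLoop cs ul (PySem.List.pyRange (((pre.length : Nat) : Int) + 1) ((cs.length : Nat) : Int)) := by
        have := ih (pre ++ [data]) (by rw [hcs2]) (seq.set (pre.length % ul.toNat) (some data)) emap1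
          (by simp [hlen]) (by rw [hlen2]; exact hseq')
          (by rw [hlen2, hzero, List.drop_zero]; exact hmap1) hnd1
        rw [hlen2] at this
        rw [this, show (((pre.length + 1 : Nat)) : Int) = ((pre.length : Nat) : Int) + 1 from by push_cast; ring]
      by_cases hfull : ul ≤ ((pre.length : Nat) : Int) + 1
      · have hfullN : pre.length + 1 = ul.toNat := by omega
        have hslice : PySem.List.slice cs (some (((pre.length : Nat) : Int) + 1 - ul)) (some (((pre.length : Nat) : Int) + 1))
            = pre ++ [data] := by
          rw [show ((pre.length : Nat) : Int) + 1 - ul = ((pre.length + 1 - ul.toNat : Nat) : Int) from by omega]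
          rw [show ((pre.length : Nat) : Int) + 1 = ((pre.length + 1 : Nat) : Int) from by push_cast; ring]
          rw [PySem.List.slice_natCast]
          rw [show pre.length + 1 - (pre.length + 1 - ul.toNat) = ul.toNat from by omega]
          rw [hcs2, List.drop_append_of_le_length (by omega), hzero, List.drop_zero]
          rw [show ul.toNat = (pre ++ [data]).length from by rw [hlen2, hfullN], List.take_left]
        rw [hslice]
        by_cases hcond : (((PySem.Set.ofList (pre ++ [data])).length : Nat) : Int) = ul
        · rw [if_pos hcond, if_pos ⟨by omega, hcond⟩]
        · rw [if_neg hcond, if_neg (by intro hh; exact hcond hh.2), hrec]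
      · have hle := PySem.Set.length_ofList_le (pre ++ [data])
        rw [hlen2] at hle
        rw [if_neg (by intro hh; omega), if_neg (by intro hh; exact hfull hh.1), hrec]

-- ===== VERDICT (by name: the statement is the Claim_ definition above) =====
theorem detect_marker_spec : Claim_equal_detect_marker := by
  unfold Claim_equal_detect_marker Spec_detect_marker
  intro ds ul _ hpre
  unfold Pre_detect_marker at hpre
  rcases hpre with hul | hempty
  · unfold detect_marker detect_marker_alt
    have h := pv_main ul hul ds.toList ds.toList [] (by simp)
      (List.replicate ul.toNat none) PySem.Dict.empty (by simp)
      (by intro m hm; simp at hm)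
      (by intro c; simp [PySem.Dict.get?_empty])
      (by simp [PySem.Dict.keys, PySem.Dict.empty])
    simp only [List.length_nil] at h
    rw [show ((0 : Nat) : Int) = 0 from rfl] at h
    rw [h]
    have hsl : PySem.Str.len ds = ((ds.toList.length : Nat) : Int) := by
      simp [PySem.Str.len]
    rw [hsl]
  · subst hempty
    rfl
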